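-- pv_equiv track=rewrite | github.com/mo9mo9-uwu-mo9mo9/Kumihan-Formatter | kumihan_formatter/parser_old.py | _text_line_iterator
-- ===== SOURCE A (Python) =====
-- from typing import TYPE_CHECKING, Any, Callable, Iterator, Optional
--
-- def _text_line_iterator(text: str) -> Iterator[str]:
--     """
--     テキストを行単位でイテレートするメモリ効率的なジェネレータ
--     """
--     start = 0
--     while start < len(text):
--         # 改行位置を検索
--         newline_pos = text.find("\n", start)
--         if newline_pos == -1:
--             # 最後の行
--             if start < len(text):
--                 yield text[start:]
--             break
--         else:
--             yield text[start:newline_pos]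
--             start = newline_pos + 1
-- ===== SOURCE B (Python) =====
-- def _text_line_iterator(text: str):
--     parts = text.split("\n")
--     if parts and parts[-1] == "":
--         parts.pop()
--     yield from parts
-- ===== Notes on version B (the rewrite author's own statement) =====
-- stated objective: idiomatic
-- what changed: Replaces the manual cursor-and-find streaming while-loop with a single library split on the newline separator followed by popping a trailing empty element and yielding from the resulting list.
import Mathlib
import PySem

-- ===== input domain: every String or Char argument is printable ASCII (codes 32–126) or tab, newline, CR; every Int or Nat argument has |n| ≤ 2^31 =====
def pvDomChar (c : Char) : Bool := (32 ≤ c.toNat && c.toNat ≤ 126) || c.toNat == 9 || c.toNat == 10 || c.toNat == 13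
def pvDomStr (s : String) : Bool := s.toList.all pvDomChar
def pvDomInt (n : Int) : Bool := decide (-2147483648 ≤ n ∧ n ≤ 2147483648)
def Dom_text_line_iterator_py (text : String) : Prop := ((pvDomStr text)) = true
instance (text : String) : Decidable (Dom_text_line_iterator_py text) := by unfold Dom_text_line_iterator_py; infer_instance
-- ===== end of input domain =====

-- B replaces A's manual cursor-and-find while-loop with one library split on the
-- newline separator plus dropping a trailing empty piece (objective: idiomatic).

-- ===== PORT A =====
-- A's while-loop: `start` cursor, find the next newline, yield slices; fuel only makes
-- the recursion total (each step moves `start` strictly forward).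
def pvALoop (text : String) : Nat → Int → List String
  | 0, _ => []
  | fuel + 1, start =>
    if start < PySem.Str.len text then
      let newline_pos := PySem.Str.findFrom text "\n" start
      if newline_pos = -1 then
        if start < PySem.Str.len text then [PySem.Str.slice text (some start) none] else []
      else
        PySem.Str.slice text (some start) (some newline_pos) ::
          pvALoop text fuel (newline_pos + 1)
    else []

def text_line_iterator_py (text : String) : List String :=
  pvALoop text (text.toList.length + 1) 0

-- ===== PORT B =====
-- Source B: parts = text.split(sep); if parts and parts[-1] == "": parts.pop(); yield from parts
def text_line_iterator_py_alt (text : String) : List String :=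
  let parts := (PySem.Str.split? text "\n").getD []
  if parts ≠ [] ∧ parts.getLast? = some "" then parts.dropLast else parts

-- ===== PRECONDITION & SPEC =====
def Spec_text_line_iterator_py (text : String) (out : List String) : Prop := out = text_line_iterator_py_alt text
instance (text : String) (out : List String) : Decidable (Spec_text_line_iterator_py text out) := by unfold Spec_text_line_iterator_py; infer_instance

-- ===== CLAIM (what is proved, stated in full; the proofs are below) =====
def Claim_equal_text_line_iterator_py : Prop := ∀ (text : String), Dom_text_line_iterator_py text → Spec_text_line_iterator_py text (text_line_iterator_py text)

-- ===== LEMMAS AND PROOFS =====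

-- Structural characterisation of splitting on '\n' with an accumulator of the
-- current (reversed) piece.
def pvSplitNl : List Char → List Char → List (List Char)
  | [], cur => [cur.reverse]
  | c :: rest, cur =>
    if c = '\n' then cur.reverse :: pvSplitNl rest [] else pvSplitNl rest (c :: cur)

def pvDropTE (l : List (List Char)) : List (List Char) :=
  if l ≠ [] ∧ l.getLast? = some [] then l.dropLast else l

def pvLines (cs : List Char) : List (List Char) := pvDropTE (pvSplitNl cs [])

theorem pvSplitNl_ne_nil (cs cur : List Char) : pvSplitNl cs cur ≠ [] := by
  induction cs generalizing cur with
  | nil => simp [pvSplitNl]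
  | cons c rest ih =>
    simp only [pvSplitNl]
    split_ifs <;> simp [ih]

theorem pvSplitNl_no_nl (xs : List Char) (cur : List Char) (h : '\n' ∉ xs) :
    pvSplitNl xs cur = [cur.reverse ++ xs] := by
  induction xs generalizing cur with
  | nil => simp [pvSplitNl]
  | cons c rest ih =>
    simp only [List.mem_cons, not_or] at h
    simp only [pvSplitNl, if_neg (Ne.symm h.1)]
    rw [ih _ h.2]; simp

theorem pvSplitNl_append (xs ys cur : List Char) (h : '\n' ∉ xs) :
    pvSplitNl (xs ++ '\n' :: ys) cur = (cur.reverse ++ xs) :: pvSplitNl ys [] := by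
  induction xs generalizing cur with
  | nil => simp [pvSplitNl]
  | cons c rest ih =>
    simp only [List.mem_cons, not_or] at h
    simp only [List.cons_append, pvSplitNl, if_neg (Ne.symm h.1)]
    rw [ih _ h.2]; simp

theorem pvDropTE_cons (a : List Char) (l : List (List Char)) (h : l ≠ []) :
    pvDropTE (a :: l) = a :: pvDropTE l := by
  obtain ⟨b, l', rfl⟩ := List.exists_cons_of_ne_nil h
  simp only [pvDropTE, List.getLast?_cons_cons, ne_eq, not_false_eq_true,
    true_and, List.cons_ne_nil]
  split_ifs <;> simp [List.dropLast]

-- The `splitOn.go` worker, with enough fuel, computes pvSplitNl.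
theorem pvSplitOn_go_eq (fuel : Nat) (l cur : List Char) (acc : List (List Char))
    (h : l.length ≤ fuel) :
    PySem.Chars.splitOn.go ['\n'] fuel l cur acc = acc.reverse ++ pvSplitNl l cur := by
  induction fuel generalizing l cur acc with
  | zero =>
    have : l = [] := by simpa using List.length_eq_zero_iff.mp (Nat.le_zero.mp h)
    subst this
    simp [PySem.Chars.splitOn.go, pvSplitNl]
  | succ fuel ih =>
    cases l with
    | nil => simp [PySem.Chars.splitOn.go, pvSplitNl]
    | cons c rest =>
      simp only [PySem.Chars.splitOn.go]
      by_cases hc : c = '\n'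
      · subst hc
        have hp : List.isPrefixOf ['\n'] ('\n' :: rest) = true := by
          simp [List.isPrefixOf]
        rw [if_pos hp]
        simp only [List.length_cons] at h
        simp only [List.length_singleton, List.drop_succ_cons, List.drop_zero]
        rw [ih _ _ _ (by omega)]
        simp [pvSplitNl]
      · have hp : List.isPrefixOf ['\n'] (c :: rest) = false := by
          simp [List.isPrefixOf]
          intro h'; exact absurd h'.symm hc
        rw [if_neg (by simp [hp])]
        simp only [List.length_cons] at h
        rw [ih _ _ _ (by omega)]
        simp [pvSplitNl, hc]

theorem pvSplitOn_eq (cs : List Char) :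
    PySem.Chars.splitOn cs ['\n'] = pvSplitNl cs [] := by
  have := pvSplitOn_go_eq (cs.length + 1) cs [] [] (by omega)
  simpa [PySem.Chars.splitOn] using this

-- B's port computes the character-level lines, mapped to strings.
theorem pvAlt_eq (text : String) :
    text_line_iterator_py_alt text = (pvLines text.toList).map String.ofList := by
  have hmap := PySem.Str.split?_map text "\n"
  have hchars : PySem.Chars.split? text.toList "\n".toList =
      some (pvSplitNl text.toList []) := by
    have : ("\n" : String).toList = ['\n'] := rfl
    rw [this]
    simp [PySem.Chars.split?, pvSplitOn_eq]
  rw [hchars] at hmap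
  obtain ⟨parts, hp, hmap⟩ : ∃ parts, PySem.Str.split? text "\n" = some parts ∧
      parts.map String.toList = pvSplitNl text.toList [] := by
    cases hsp : PySem.Str.split? text "\n" with
    | none => rw [hsp] at hmap; simp at hmap
    | some parts => rw [hsp] at hmap; simp at hmap; exact ⟨parts, rfl, hmap⟩
  have hparts : parts = (pvSplitNl text.toList []).map String.ofList := by
    rw [← hmap, List.map_map]
    have : (String.ofList ∘ String.toList) = id := by
      funext s; simp
    simp [this]
  set M := pvSplitNl text.toList [] with hM
  have h1 : M ≠ [] := pvSplitNl_ne_nil _ _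
  unfold text_line_iterator_py_alt
  rw [hp]
  simp only [Option.getD_some, hparts]
  by_cases h2 : M.getLast? = some []
  · rw [if_pos ⟨by simp [h1], by rw [List.getLast?_map, h2]; rfl⟩]
    rw [pvLines, ← hM, pvDropTE, if_pos ⟨h1, h2⟩, List.map_dropLast]
  · rw [if_neg, pvLines, ← hM, pvDropTE, if_neg (by simp [h2])]
    rintro ⟨-, hlast⟩
    rw [List.getLast?_map] at hlast
    obtain ⟨x, hx, hox⟩ := Option.map_eq_some_iff.mp hlast
    have : x = [] := by
      have := congrArg String.toList hox
      simpa using this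
    exact h2 (this ▸ hx)

-- A's loop computes the character-level lines of the suffix from `start`.
theorem pvALoop_eq (text : String) (fuel k : Nat) (hk : k ≤ text.toList.length)
    (hfuel : text.toList.length - k < fuel) :
    pvALoop text fuel (k : Int) = (pvLines (text.toList.drop k)).map String.ofList := by
  induction fuel generalizing k with
  | zero => omega
  | succ fuel ih =>
    set s := text.toList with hs
    by_cases hlt : k < s.length
    · have hklt : (k : Int) < PySem.Str.len text := by
        rw [PySem.Str.len_eq, ← hs]; exact_mod_cast hlt
      rw [pvALoop, if_pos hklt]
      have hff : PySem.Str.findFrom text "\n" (k : Int) none =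
          if PySem.Chars.find (s.drop k) ['\n'] = -1 then -1
          else (k : Int) + PySem.Chars.find (s.drop k) ['\n'] := by
        rw [PySem.Str.findFrom_eq]
        have : ("\n" : String).toList = ['\n'] := rfl
        rw [this, ← hs, PySem.Chars.findFrom_natCast s ['\n'] k hk]
      by_cases hfind : PySem.Chars.find (s.drop k) ['\n'] = -1
      · rw [hff, if_pos hfind, if_pos rfl, if_pos hklt]
        -- no newline from k on: A yields the single final line
        have hno : '\n' ∉ s.drop k := by
          intro hmem
          obtain ⟨u, v, huv⟩ := List.mem_iff_append.mp hmem
          exact (PySem.Chars.find_eq_neg_one_iff (s.drop k) ['\n']).mp hfind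
            ⟨u, v, by rw [huv]; simp⟩
        have hne : s.drop k ≠ [] := by
          simp [List.drop_eq_nil_iff]; omega
        rw [pvLines, pvSplitNl_no_nl _ _ hno, pvDropTE, if_neg]
        swap
        · rintro ⟨-, hlast⟩
          simp only [List.reverse_nil, List.nil_append, List.getLast?_singleton,
            Option.some.injEq] at hlast
          exact hne hlast
        have hslice : PySem.Str.slice text (some (k : Int)) none =
            String.ofList (s.drop k) := by
          apply String.toList_inj.mp
          rw [PySem.Str.toList_slice]
          simp [PySem.Chars.slice_eq_listSlice, ← hs,
            PySem.List.slice_from_natCast]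
        simp [hslice]
      · rw [hff, if_neg hfind]
        set q := PySem.Chars.find (s.drop k) ['\n'] with hq
        have hq0 : 0 ≤ q := by
          rcases em (['\n'] <:+: s.drop k) with hin | hin
          · exact (PySem.Chars.find_nonneg_iff _ _).mpr hin
          · exact absurd ((PySem.Chars.find_eq_neg_one_iff _ _).mpr hin) hfind
        set qn := q.toNat with hqn
        have hqcast : q = (qn : Int) := (Int.toNat_of_nonneg hq0).symm
        have hspec := PySem.Chars.find_spec (s := s.drop k) (sub := ['\n']) hq0
        obtain ⟨hpre, hmin⟩ := hspec
        -- the character at position qn of s.drop k is '\n'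
        have hqlen : qn < (s.drop k).length := by
          by_contra hge
          push Not at hge
          rw [List.drop_eq_nil_of_le hge] at hpre
          simp at hpre
        have hdropq : (s.drop k).drop qn = '\n' :: (s.drop k).drop (qn + 1) := by
          obtain ⟨t, ht⟩ := hpre
          have ht' : (s.drop k).drop qn = '\n' :: t := by simpa using ht.symm
          have ht2 : (s.drop k).drop (qn + 1) = t := by
            have h1 : (s.drop k).drop (qn + 1) = ((s.drop k).drop qn).drop 1 := by
              conv_rhs => rw [List.drop_drop]
            rw [h1, ht']
            rfl
          rw [ht', ht2]
        have hdecomp : s.drop k = (s.drop k).take qn ++ '\n' :: (s.drop k).drop (qn + 1) := by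
          conv_lhs => rw [← List.take_append_drop qn (s.drop k)]
          rw [hdropq]
        have hno : '\n' ∉ (s.drop k).take qn := by
          intro hmem
          obtain ⟨i, hi, hgi⟩ := List.getElem_of_mem hmem
          have hilt : i < qn := by
            have := hi; rw [List.length_take] at this; omega
          refine hmin i hilt ?_
          have hielt : i < (s.drop k).length := by omega
          rw [List.getElem_take] at hgi
          rw [List.drop_eq_getElem_cons hielt, hgi]
          exact ⟨_, rfl⟩
        have hne : (k : Int) + q ≠ -1 := by omega
        rw [if_neg hne]
        -- head slice = take qn of the suffix
        have hslice : PySem.Str.slice text (some (k : Int)) (some ((k : Int) + q)) =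
            String.ofList ((s.drop k).take qn) := by
          apply String.toList_inj.mp
          rw [PySem.Str.toList_slice]
          have : (k : Int) + q = ((k + qn : Nat) : Int) := by omega
          rw [this]
          simp only [PySem.Chars.slice_eq_listSlice, ← hs, PySem.List.slice_natCast]
          have : k + qn - k = qn := by omega
          rw [this]
          simp [List.take_drop]
        -- tail: recurse at k + qn + 1
        have harg : (k : Int) + q + 1 = ((k + qn + 1 : Nat) : Int) := by omega
        rw [harg, ih (k + qn + 1)
          (by have := hqlen; rw [List.length_drop] at this; omega) (by omega)]
        have hdrop2 : s.drop (k + qn + 1) = (s.drop k).drop (qn + 1) := by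
          rw [List.drop_drop, Nat.add_assoc]
        rw [hdrop2]
        -- rhs: pvLines of the decomposed suffix
        conv_rhs => rw [hdecomp]
        simp only [pvLines]
        rw [pvSplitNl_append _ _ _ hno, pvDropTE_cons _ _ (pvSplitNl_ne_nil _ _)]
        simp [hslice]
    · rw [pvALoop, if_neg (by rw [PySem.Str.len_eq, ← hs]; exact_mod_cast hlt)]
      have : s.drop k = [] := List.drop_eq_nil_of_le (by omega)
      rw [this]
      simp [pvLines, pvSplitNl, pvDropTE]

-- ===== VERDICT (by name: the statement is the Claim_ definition above) =====
theorem text_line_iterator_py_spec : Claim_equal_text_line_iterator_py := by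
  intro text _
  unfold Spec_text_line_iterator_py text_line_iterator_py
  rw [pvAlt_eq]
  have := pvALoop_eq text (text.toList.length + 1) 0 (by omega) (by omega)
  simpa using this
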